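-- pv_equiv track=rewrite | github.com/Ooooooo972/pyhton | 199.py | greatestSmallerOnLeft
-- ===== SOURCE A (Python) =====
-- import bisect
--
-- def greatestSmallerOnLeft(arr, n):
--     result = []
--     sorted_list = []
--
--     for i in range(n):
--         num = arr[i]
--         idx = bisect.bisect_left(sorted_list, num)
--
--         if idx > 0:
--             result.append(sorted_list[idx - 1])
--         else:
--             result.append(-1)
--
--         bisect.insort(sorted_list, num)
--
--     return result
-- ===== SOURCE B (Python) =====
-- def greatestSmallerOnLeft(arr, n):
--     return [max((x for x in arr[:i] if x < arr[i]), default=-1) for i in range(n)]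
-- ===== Notes on version B (the rewrite author's own statement) =====
-- stated objective: simpler
-- what changed: A maintains an incrementally-updated sorted list and answers each query with a bisect predecessor lookup; B computes each answer directly as the maximum of the strictly-smaller elements in the prefix arr[:i] (default -1), with no auxiliary structure.
import Mathlib
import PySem

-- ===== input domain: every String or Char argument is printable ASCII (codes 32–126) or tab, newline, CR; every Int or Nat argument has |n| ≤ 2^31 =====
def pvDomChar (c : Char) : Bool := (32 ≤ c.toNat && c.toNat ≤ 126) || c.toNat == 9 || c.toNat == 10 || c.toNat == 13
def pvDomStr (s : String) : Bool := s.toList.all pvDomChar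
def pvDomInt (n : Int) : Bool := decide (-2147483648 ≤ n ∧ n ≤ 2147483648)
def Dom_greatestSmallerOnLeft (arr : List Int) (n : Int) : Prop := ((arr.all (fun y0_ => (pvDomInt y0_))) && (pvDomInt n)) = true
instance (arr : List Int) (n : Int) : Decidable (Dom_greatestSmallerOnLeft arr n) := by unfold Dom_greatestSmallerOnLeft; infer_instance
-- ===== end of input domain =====

-- B replaces A's incrementally-maintained sorted list + bisect predecessor lookup by a direct
-- per-index maximum over the strictly-smaller elements of the prefix (objective: simpler).

-- ===== PORT A =====
-- the body of A's 'for i in range(n)' loop, as the obvious structural recursion on the loop index;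
-- bisect.bisect_left is PySem.List.bisectLeft, bisect.insort inserts at the bisect_right position
def gsolLoop (arr : List Int) (i n : Int) (result sorted : List Int) : List Int :=
  if _h : i < n then
    let num := (PySem.List.pyGet? arr i).getD 0        -- arr[i]; in range under Pre_
    let idx := PySem.List.bisectLeft sorted num
    let result' := if idx > 0 then
        result ++ [(PySem.List.pyGet? sorted ((idx : Int) - 1)).getD 0]
      else
        result ++ [-1]
    let r := PySem.List.bisectRight sorted num          -- bisect.insort sorted num
    gsolLoop arr (i + 1) n result' (sorted.take r ++ num :: sorted.drop r)
  else
    result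
termination_by (n - i).toNat
decreasing_by omega

def greatestSmallerOnLeft (arr : List Int) (n : Int) : List Int :=
  gsolLoop arr 0 n [] []

-- ===== PORT B =====
def greatestSmallerOnLeft_alt (arr : List Int) (n : Int) : List Int :=
  (List.range n.toNat).map (fun i =>
    PySem.List.maxD
      ((arr.take i).filter (fun x => x < (PySem.List.pyGet? arr (i : Int)).getD 0))
      (fun x => x) (-1))

-- ===== PRECONDITION & SPEC =====
-- Pre_ excludes exactly the inputs where A raises IndexError: n exceeding len(arr)
def Pre_greatestSmallerOnLeft (arr : List Int) (n : Int) : Prop := n ≤ (arr.length : Int)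
instance (arr : List Int) (n : Int) : Decidable (Pre_greatestSmallerOnLeft arr n) := by
  unfold Pre_greatestSmallerOnLeft; infer_instance
def pvWitness_greatestSmallerOnLeft : List Int × Int := ([3, 1, 2, 2], 4)

def Spec_greatestSmallerOnLeft (arr : List Int) (n : Int) (out : List Int) : Prop := out = greatestSmallerOnLeft_alt arr n
instance (arr : List Int) (n : Int) (out : List Int) : Decidable (Spec_greatestSmallerOnLeft arr n out) := by unfold Spec_greatestSmallerOnLeft; infer_instance

-- ===== CLAIM (what is proved, stated in full; the proofs are below) =====
def Claim_equal_greatestSmallerOnLeft : Prop := ∀ (arr : List Int) (n : Int), Dom_greatestSmallerOnLeft arr n → Pre_greatestSmallerOnLeft arr n → Spec_greatestSmallerOnLeft arr n (greatestSmallerOnLeft arr n)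

-- ===== LEMMAS AND PROOFS =====

-- B's value at index i, as a function of the prefix and the element
def bVal (pre : List Int) (v : Int) : Int :=
  PySem.List.maxD (pre.filter (fun x => x < v)) (fun x => x) (-1)

-- max? with the identity key returns the same VALUE on permuted Int lists

lemma max?_id_perm {l₁ l₂ : List Int} (h : l₁.Perm l₂) :
    PySem.List.max? l₁ (fun x => x) = PySem.List.max? l₂ (fun x => x) := by
  match h1 : PySem.List.max? l₁ (fun x => x), h2 : PySem.List.max? l₂ (fun x => x) with
  | none, none => rfl
  | none, some m =>
    rw [PySem.List.max?_eq_none_iff] at h1; subst h1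
    have hnil : l₂ = [] := h.symm.eq_nil
    exact absurd (PySem.List.max?_mem h2) (by simp [hnil])
  | some m, none =>
    rw [PySem.List.max?_eq_none_iff] at h2; subst h2
    have hnil : l₁ = [] := h.eq_nil
    exact absurd (PySem.List.max?_mem h1) (by simp [hnil])
  | some m1, some m2 =>
    have h12 : m1 ≤ m2 := PySem.List.max?_isMax h2 m1 (h.mem_iff.mp (PySem.List.max?_mem h1))
    have h21 : m2 ≤ m1 := PySem.List.max?_isMax h1 m2 (h.symm.mem_iff.mp (PySem.List.max?_mem h2))
    simp [le_antisymm h12 h21]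

-- in a ≤-sorted list the elements < v are exactly the first bisectLeft ones

lemma filter_lt_eq_take_bisectLeft (s : List Int) (v : Int)
    (hs : s.Pairwise (· ≤ ·)) :
    s.filter (fun x => x < v) = s.take (PySem.List.bisectLeft s v) := by
  obtain ⟨hle, hlt, hge⟩ := PySem.List.bisectLeft_spec s v hs
  set idx := PySem.List.bisectLeft s v with hidx
  conv_lhs => rw [← List.take_append_drop idx s]
  rw [List.filter_append]
  have h1 : (s.take idx).filter (fun x => decide (x < v)) = s.take idx := by
    rw [List.filter_eq_self]
    intro x hx
    obtain ⟨j, hj, rfl⟩ := List.mem_iff_getElem.mp hx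
    have hj' : j < idx := lt_of_lt_of_le hj (by simp)
    have := hlt j (by simp at hj; omega) hj'
    simp [List.getElem_take] at *
    omega
  have h2 : (s.drop idx).filter (fun x => decide (x < v)) = [] := by
    rw [List.filter_eq_nil_iff]
    intro x hx
    obtain ⟨j, hj, rfl⟩ := List.mem_iff_getElem.mp hx
    rw [List.getElem_drop]
    have := hge (idx + j) (by simp at hj; omega) (by omega)
    simp; omega
  rw [h1, h2, List.append_nil]

-- core: A's predecessor pick equals B's prefix maximum
lemma pick_eq_bVal (s pre : List Int) (v : Int)
    (hs : s.Pairwise (· ≤ ·)) (hp : s.Perm pre) :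
    (if PySem.List.bisectLeft s v > 0 then
        (PySem.List.pyGet? s ((PySem.List.bisectLeft s v : Int) - 1)).getD 0
      else (-1 : Int)) = bVal pre v := by
  obtain ⟨hle, hlt, hge⟩ := PySem.List.bisectLeft_spec s v hs
  set idx := PySem.List.bisectLeft s v with hidx
  have hperm : (s.filter (fun x => x < v)).Perm (pre.filter (fun x => x < v)) := by
    simpa using hp.filter (fun x => decide (x < v))
  have hmax : PySem.List.max? (pre.filter (fun x => x < v)) (fun x => x)
      = PySem.List.max? (s.take idx) (fun x => x) := by
    rw [← max?_id_perm hperm, filter_lt_eq_take_bisectLeft s v hs]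
  unfold bVal PySem.List.maxD
  rw [hmax]
  by_cases hpos : 0 < idx
  · -- value side: s[idx-1]
    have hidxlen : idx - 1 < s.length := by omega
    have hget : PySem.List.pyGet? s ((idx : Int) - 1) = some s[idx - 1] := by
      have : ((idx : Int) - 1) = ((idx - 1 : Nat) : Int) := by omega
      rw [this, PySem.List.pyGet?_natCast, List.getElem?_eq_getElem hidxlen]
    -- the take is nonempty, so max? = some m with m = s[idx-1]
    match hm : PySem.List.max? (s.take idx) (fun x => x) with
    | none =>
      rw [PySem.List.max?_eq_none_iff] at hm
      have : (s.take idx).length = 0 := by rw [hm]; rfl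
      rw [List.length_take] at this
      omega
    | some m =>
      have hmem := PySem.List.max?_mem hm
      obtain ⟨j, hj, hjm⟩ := List.mem_iff_getElem.mp hmem
      have hjlen : j < s.length := by simp at hj; omega
      have hjidx : j < idx := by simp at hj; omega
      have hps := List.pairwise_iff_getElem.mp hs
      have hle1 : m ≤ s[idx - 1] := by
        rcases eq_or_lt_of_le (Nat.le_sub_one_of_lt hjidx) with heq | hlt'
        · subst heq; rw [← hjm]; simp [List.getElem_take]
        · have := hps j (idx - 1) hjlen hidxlen hlt'
          rw [← hjm]; simpa [List.getElem_take] using this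
      have hle2 : s[idx - 1] ≤ m := by
        apply PySem.List.max?_isMax hm
        exact List.mem_iff_getElem.mpr ⟨idx - 1, by simp; omega, by simp [List.getElem_take]⟩
      simp [hpos, hget, le_antisymm hle1 hle2]
  · -- idx = 0: empty take
    have h0 : idx = 0 := by omega
    simp [h0, PySem.List.max?]

-- insort keeps the list sorted; and it appends one occurrence of v, up to permutation

lemma insort_sorted (s : List Int) (v : Int) (hs : s.Pairwise (· ≤ ·)) :
    (s.take (PySem.List.bisectRight s v) ++ v :: s.drop (PySem.List.bisectRight s v)).Pairwise (· ≤ ·) := by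
  obtain ⟨hle, hlt, hge⟩ := PySem.List.bisectRight_spec s v hs
  set r := PySem.List.bisectRight s v with hr
  rw [List.pairwise_append]
  refine ⟨hs.sublist (List.take_sublist _ _), ?_, ?_⟩
  · rw [List.pairwise_cons]
    refine ⟨?_, hs.sublist (List.drop_sublist _ _)⟩
    intro y hy
    obtain ⟨j, hj, rfl⟩ := List.mem_iff_getElem.mp hy
    rw [List.getElem_drop]
    have := hge (r + j) (by simp at hj; omega) (by omega)
    omega
  · intro x hx y hy
    obtain ⟨j, hj, rfl⟩ := List.mem_iff_getElem.mp hx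
    have hjlen : j < s.length := by simp at hj; omega
    have hjr : j < r := by simp at hj; omega
    have hxv : s[j] ≤ v := by simpa using hlt j hjlen hjr
    rw [List.getElem_take]
    rcases List.mem_cons.mp hy with rfl | hy'
    · exact hxv
    · obtain ⟨k, hk, rfl⟩ := List.mem_iff_getElem.mp hy'
      rw [List.getElem_drop]
      have := hge (r + k) (by simp at hk; omega) (by omega)
      omega

lemma insort_perm (s pre : List Int) (v : Int) (hp : s.Perm pre) :
    (s.take (PySem.List.bisectRight s v) ++ v :: s.drop (PySem.List.bisectRight s v)).Perm (pre ++ [v]) := by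
  refine List.Perm.trans List.perm_middle ?_
  rw [List.take_append_drop]
  exact (hp.cons v).trans (List.perm_append_singleton v pre).symm

-- loop invariant: sorted is a sorted permutation of the processed prefix
lemma gsolLoop_eq (arr : List Int) : ∀ (m i : Nat) (res s : List Int),
    i + m ≤ arr.length → s.Pairwise (· ≤ ·) → s.Perm (arr.take i) →
    gsolLoop arr (i : Int) ((i : Int) + (m : Int)) res s
      = res ++ (List.range m).map (fun k =>
          bVal (arr.take (i + k)) ((PySem.List.pyGet? arr ((i + k : Nat) : Int)).getD 0)) := by
  intro m
  induction m with
  | zero =>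
    intro i res s _ _ _
    rw [gsolLoop]
    simp
  | succ m ih =>
    intro i res s hlen hsort hperm
    rw [gsolLoop]
    have hi : (i : Int) < (i : Int) + ((m + 1 : Nat) : Int) := by push_cast; omega
    rw [dif_pos hi]
    have hilen : i < arr.length := by omega
    have hnum : (PySem.List.pyGet? arr (i : Int)).getD 0 = arr[i] := by
      rw [PySem.List.pyGet?_natCast, List.getElem?_eq_getElem hilen]; rfl
    have hstep : ((i : Int) + ((m + 1 : Nat) : Int)) = ((i + 1 : Nat) : Int) + (m : Nat) := by
      push_cast; ring
    have hcast : (i : Int) + 1 = ((i + 1 : Nat) : Int) := by push_cast; ring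
    rw [hstep, hcast]
    have htake : arr.take (i + 1) = arr.take i ++ [arr[i]] := by
      rw [List.take_add_one, List.getElem?_eq_getElem hilen]; rfl
    rw [ih (i + 1) _ _ (by omega)
        (insort_sorted s _ hsort)
        (by rw [htake, ← hnum]; exact insort_perm s _ _ hperm)]
    have hpick := pick_eq_bVal s (arr.take i) ((PySem.List.pyGet? arr (i : Int)).getD 0) hsort hperm
    have hfun : ∀ (k : Nat),
        bVal (List.take (i + 1 + k) arr) ((PySem.List.pyGet? arr ((i + 1 + k : Nat) : Int)).getD 0)
          = bVal (List.take (i + (k + 1)) arr) ((PySem.List.pyGet? arr ((i + (k + 1) : Nat) : Int)).getD 0) := by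
      intro k
      have h1 : i + 1 + k = i + (k + 1) := by omega
      rw [h1]
    rw [List.range_succ_eq_map, List.map_cons, List.map_map]
    simp only [Nat.add_zero]
    split_ifs with hpos
    · rw [if_pos hpos] at hpick
      rw [hpick, List.append_assoc, List.singleton_append]
      congr 1
      congr 1
      apply List.map_congr_left
      intro k _
      exact hfun k
    · rw [if_neg hpos] at hpick
      rw [hpick, List.append_assoc, List.singleton_append]
      congr 1
      congr 1
      apply List.map_congr_left
      intro k _
      exact hfun k

-- ===== VERDICT (by name: the statement is the Claim_ definition above) =====
theorem greatestSmallerOnLeft_spec : Claim_equal_greatestSmallerOnLeft := by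
  intro arr n _ hpre
  unfold Spec_greatestSmallerOnLeft greatestSmallerOnLeft greatestSmallerOnLeft_alt
  by_cases hn : 0 ≤ n
  · have h0 : (0 : Int) = ((0 : Nat) : Int) := rfl
    have hn' : n = ((n.toNat : Nat) : Int) := by omega
    rw [h0, hn']
    have : ((0 : Nat) : Int) + ((n.toNat : Nat) : Int) = ((n.toNat : Nat) : Int) := by ring
    rw [← this]
    rw [gsolLoop_eq arr n.toNat 0 [] [] (by unfold Pre_greatestSmallerOnLeft at hpre; omega)
        (by simp) (by simp)]
    simp only [List.nil_append, Nat.zero_add]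
    simp [bVal]
    congr 2
    omega
  · have h1 : n.toNat = 0 := by omega
    rw [gsolLoop, dif_neg (by omega), h1]
    simp
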